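-- pv_equiv track=rewrite | github.com/shimoku-tech/shimoku-api-python | src/shimoku/api/resources/universe.py | interpret_version
-- ===== SOURCE A (Python) =====
-- def interpret_version(version: str) -> list:
--     """Interpret a version string by appending '0' to each section for sorting."""
--     numbers = "0123456789"
--     if not version:
--         return [0, 0, 0]
--
--     def interpret_version_section(section: str) -> list:
--         """Interpret a version section, considering non-numeric characters as earlier."""
--         res_section = []
--         number = ""
--         for c in section:
--             if c in numbers:
--                 number += c
--             else:
--                 if number:
--                     res_section.append(ord("z") + int(number))
--                     number = ""
--                 res_section.append(ord(c))
--         if number: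
--             res_section.append(ord("z") + int(number))
--         return res_section
--
--     return [
--         interpret_version_section(section + "0") for section in version.split(".")
--     ]
-- ===== SOURCE B (Python) =====
-- def interpret_version(version: str) -> list:
--     """Interpret a version string: tokenize each section into maximal digit
--     runs / single non-digit chars, then map tokens to sortable numbers."""
--     if not version:
--         return [0, 0, 0]
--
--     def tokens(section: str) -> list:
--         toks = []
--         i = 0
--         n = len(section)
--         while i < n:
--             if section[i].isdigit():
--                 j = i
--                 while j < n and section[j].isdigit():
--                     j += 1
--                 toks.append(section[i:j])
--                 i = j
--             else:
--                 toks.append(section[i])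
--                 i += 1
--         return toks
--
--     return [
--         [ord("z") + int(t) if t.isdigit() else ord(t) for t in tokens(section + "0")]
--         for section in version.split(".")
--     ]
-- ===== Notes on version B (the rewrite author's own statement) =====
-- stated objective: idiomatic
-- what changed: Replaces the char-by-char digit-accumulator loop with its end-of-loop flush by a tokenize-then-map decomposition: each section is first cut into tokens (maximal digit runs, single non-digit chars), then a single comprehension maps each token to its number.
-- outside the precondition, e.g. on interpret_version(''): A returns [0, 0, 0], B returns [0, 0, 0]
import Mathlib
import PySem

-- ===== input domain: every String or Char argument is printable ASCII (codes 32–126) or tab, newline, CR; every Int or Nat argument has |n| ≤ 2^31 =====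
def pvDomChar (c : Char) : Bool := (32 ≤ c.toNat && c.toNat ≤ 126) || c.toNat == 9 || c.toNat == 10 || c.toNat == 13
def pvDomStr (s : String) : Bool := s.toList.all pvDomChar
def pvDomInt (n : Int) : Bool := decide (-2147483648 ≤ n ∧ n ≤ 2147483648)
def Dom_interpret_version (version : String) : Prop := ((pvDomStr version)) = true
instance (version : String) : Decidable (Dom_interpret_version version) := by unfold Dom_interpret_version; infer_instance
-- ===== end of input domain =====

-- B rewrites A's digit-accumulator loop as tokenize-then-map (same cost, plainer decomposition);
-- return values agree on every non-empty version string.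

-- ===== PORT A =====
-- the string "0123456789" of A
def pvNumbers : List Char := "0123456789".toList

-- int(number) for the all-digit runs A accumulates (exact there: no sign/space/underscore occurs)
def pvDigVal (cs : List Char) : Int := cs.foldl (fun a c => 10 * a + ((c.toNat : Int) - 48)) 0

-- A's inner loop over a section: state = remaining chars and the pending digit run `number`;
-- the emitted `res_section` is returned instead of threaded (same elements, same order)
def pvAgo : List Char → List Char → List Int
  | [], number => if number.isEmpty then [] else [122 + pvDigVal number]
  | c :: rest, number =>
    if pvNumbers.contains c then pvAgo rest (number ++ [c])
    else (if number.isEmpty then [] else [122 + pvDigVal number]) ++ ((c.toNat : Int) :: pvAgo rest [])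

-- Python A returns the flat list [0, 0, 0] on "" (not of the return type List (List Int)); that input
-- is outside Pre_, and the port returns [] there as a placeholder.
def interpret_version (version : String) : List (List Int) :=
  if version = "" then []
  else (PySem.Chars.splitOn version.toList ['.']).map (fun sec => pvAgo (sec ++ ['0']) [])

-- ===== PORT B =====
-- Source B's tokens(): cut a section into maximal digit runs and single non-digit chars
def pvTok : List Char → List (List Char)
  | [] => []
  | c :: rest =>
    if PySem.Chars.isdigit c then
      (c :: rest.takeWhile PySem.Chars.isdigit) :: pvTok (rest.dropWhile PySem.Chars.isdigit)
    else [c] :: pvTok rest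
  termination_by l => l.length
  decreasing_by
  · have := List.length_dropWhile_le PySem.Chars.isdigit rest; simp; omega
  · simp

-- Source B's per-token map: ord("z") + int(t) if t.isdigit() else ord(t)
-- (non-digit tokens are single chars, so ord(t) is the head's code point)
def pvTokVal (t : List Char) : Int :=
  if PySem.Chars.strIsdigit t then 122 + pvDigVal t else ((t.headD ' ').toNat : Int)

def interpret_version_alt (version : String) : List (List Int) :=
  if version = "" then []
  else (PySem.Chars.splitOn version.toList ['.']).map (fun sec => (pvTok (sec ++ ['0'])).map pvTokVal)

-- ===== PRECONDITION & SPEC =====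
-- Pre_ excludes only the empty string, where Python A (and B) return the flat list [0, 0, 0],
-- which is not a value of the declared type list[list[int]].
def Pre_interpret_version (version : String) : Prop := version ≠ ""
instance (version : String) : Decidable (Pre_interpret_version version) := by unfold Pre_interpret_version; infer_instance
def pvWitness_interpret_version : String := "1.2a"

def Spec_interpret_version (version : String) (out : List (List Int)) : Prop := out = interpret_version_alt version
instance (version : String) (out : List (List Int)) : Decidable (Spec_interpret_version version out) := by unfold Spec_interpret_version; infer_instance

-- ===== CLAIM (what is proved, stated in full; the proofs are below) =====
def Claim_equal_interpret_version : Prop := ∀ (version : String), Dom_interpret_version version → Pre_interpret_version version → Spec_interpret_version version (interpret_version version)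

-- ===== LEMMAS AND PROOFS =====

-- A's membership test in "0123456789" is B's isdigit
theorem pvContains_eq_isdigit (c : Char) : pvNumbers.contains c = PySem.Chars.isdigit c := by
  have h : pvNumbers = ['0','1','2','3','4','5','6','7','8','9'] := rfl
  rw [h, PySem.Chars.isdigit]
  simp only [List.contains_eq_mem, List.mem_cons, List.not_mem_nil, or_false]
  rw [Bool.eq_iff_iff]
  simp only [decide_eq_true_eq, Bool.and_eq_true, Char.ext_iff, Char.le_def]
  constructor
  · rintro (h|h|h|h|h|h|h|h|h|h) <;> rw [h] <;> exact ⟨by decide, by decide⟩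
  · rintro ⟨h1, h2⟩
    rcases c with ⟨v, hv⟩
    simp only [UInt32.le_iff_toBitVec_le, UInt32.ext_iff] at *
    rcases v with ⟨bv⟩
    simp_all [BitVec.le_def, BitVec.toNat_ofNat]
    omega

theorem pvTok_cons_digit (c : Char) (r : List Char) (hc : PySem.Chars.isdigit c = true) :
    pvTok (c :: r) = (c :: r.takeWhile PySem.Chars.isdigit) :: pvTok (r.dropWhile PySem.Chars.isdigit) := by
  rw [pvTok.eq_def]; simp [hc]

theorem pvTok_cons_nondigit (c : Char) (r : List Char) (hc : PySem.Chars.isdigit c = false) :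
    pvTok (c :: r) = [c] :: pvTok r := by
  rw [pvTok.eq_def]; simp [hc]

theorem pvStrIsdigit_run (d : Char) (ds : List Char) (hd : PySem.Chars.isdigit d = true)
    (hds : ∀ x ∈ ds, PySem.Chars.isdigit x = true) : PySem.Chars.strIsdigit (d :: ds) = true := by
  simp only [PySem.Chars.strIsdigit]
  simp [hd]
  exact hds

theorem pvTok_all_digit (d : Char) (ds : List Char) (hd : PySem.Chars.isdigit d = true)
    (hds : ∀ x ∈ ds, PySem.Chars.isdigit x = true) : pvTok (d :: ds) = [d :: ds] := by
  rw [pvTok_cons_digit d ds hd, List.takeWhile_eq_self_iff.mpr hds,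
    List.dropWhile_eq_nil_iff.mpr hds, pvTok]

theorem pvTakeDrop_split (ds : List Char) (c : Char) (r : List Char)
    (hds : ∀ x ∈ ds, PySem.Chars.isdigit x = true) (hc : PySem.Chars.isdigit c = false) :
    (ds ++ c :: r).takeWhile PySem.Chars.isdigit = ds ∧
    (ds ++ c :: r).dropWhile PySem.Chars.isdigit = c :: r := by
  induction ds with
  | nil => simp [hc]
  | cons d ds ih =>
    have hd := hds d (by simp)
    have := ih (fun x hx => hds x (by simp [hx]))
    simp [hd, this.1, this.2]

-- the invariant connecting A's accumulator loop with B's tokenizer: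
-- running A's loop with pending digit run `num` computes B's value of `num ++ s`
theorem pvAgo_eq_tok (s : List Char) : ∀ num : List Char,
    (∀ x ∈ num, PySem.Chars.isdigit x = true) →
    pvAgo s num = (pvTok (num ++ s)).map pvTokVal := by
  induction s with
  | nil =>
    intro num hnum
    rw [pvAgo, List.append_nil]
    cases num with
    | nil => simp [pvTok]
    | cons d ds =>
      have hd := hnum d (by simp)
      have hds : ∀ x ∈ ds, PySem.Chars.isdigit x = true := fun x hx => hnum x (by simp [hx])
      rw [pvTok_all_digit d ds hd hds]
      simp [pvTokVal, pvStrIsdigit_run d ds hd hds]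
  | cons c rest ih =>
    intro num hnum
    rw [pvAgo, pvContains_eq_isdigit]
    by_cases hc : PySem.Chars.isdigit c = true
    · rw [if_pos hc, ih (num ++ [c]) (by
        intro x hx
        rcases List.mem_append.mp hx with h | h
        · exact hnum x h
        · simp at h; subst h; exact hc)]
      simp
    · rw [if_neg hc]
      rw [Bool.not_eq_true] at hc
      have hrest := ih [] (by simp)
      simp only [List.nil_append] at hrest
      have hone : PySem.Chars.strIsdigit [c] = false := by
        simp [PySem.Chars.strIsdigit, hc]
      cases num with
      | nil =>
        rw [List.nil_append, pvTok_cons_nondigit c rest hc]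
        simp [pvTokVal, hone, hrest]
      | cons d ds =>
        have hd := hnum d (by simp)
        have hds : ∀ x ∈ ds, PySem.Chars.isdigit x = true := fun x hx => hnum x (by simp [hx])
        obtain ⟨ht, hdr⟩ := pvTakeDrop_split ds c rest hds hc
        show _ = (pvTok (d :: (ds ++ c :: rest))).map pvTokVal
        rw [pvTok_cons_digit d _ hd, ht, hdr, pvTok_cons_nondigit c rest hc]
        simp [pvTokVal, pvStrIsdigit_run d ds hd hds, hone, hrest]

-- ===== VERDICT (by name: the statement is the Claim_ definition above) =====
theorem interpret_version_spec : Claim_equal_interpret_version := by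
  intro version _ hpre
  unfold Spec_interpret_version interpret_version interpret_version_alt
  rw [if_neg hpre, if_neg hpre]
  exact List.map_congr_left (fun sec _ => pvAgo_eq_tok (sec ++ ['0']) [] (by simp))
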